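-- pv_equiv track=rewrite | github.com/nold-ai/specfact-cli-modules | packages/specfact-backlog/src/specfact_backlog/policy_engine/policy_engine/main.py | _normalize_rule_filters
-- ===== SOURCE A (Python) =====
-- def _normalize_rule_filters(rule_filters: list[str] | None) -> list[str]:
--     if not rule_filters:
--         return []
--     tokens: list[str] = []
--     for raw in rule_filters:
--         for token in raw.split(","):
--             stripped = token.strip()
--             if stripped:
--                 tokens.append(stripped)
--     return tokens
-- ===== SOURCE B (Python) =====
-- def _normalize_rule_filters(rule_filters):
--     tokens = []
--     for raw in (rule_filters or []):
--         cur = []   # chars of the current token (trailing whitespace withheld)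
--         pend = []  # pending interior whitespace, flushed only before a non-space char
--         for ch in raw:
--             if ch == ',':
--                 if cur:
--                     tokens.append(''.join(cur))
--                 cur = []
--                 pend = []
--             elif ch.isspace():
--                 if cur:
--                     pend.append(ch)
--             else:
--                 cur = cur + pend + [ch]
--                 pend = []
--         if cur:
--             tokens.append(''.join(cur))
--     return tokens
-- ===== Notes on version B (the rewrite author's own statement) =====
-- stated objective: alternative
-- what changed: Replaces A's split-then-strip-then-filter pipeline with a single character-level state machine: one scan per string keeps an accumulator of the current token plus a pending-whitespace buffer, flushing on commas, so no split or strip call is ever made.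
import Mathlib
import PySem

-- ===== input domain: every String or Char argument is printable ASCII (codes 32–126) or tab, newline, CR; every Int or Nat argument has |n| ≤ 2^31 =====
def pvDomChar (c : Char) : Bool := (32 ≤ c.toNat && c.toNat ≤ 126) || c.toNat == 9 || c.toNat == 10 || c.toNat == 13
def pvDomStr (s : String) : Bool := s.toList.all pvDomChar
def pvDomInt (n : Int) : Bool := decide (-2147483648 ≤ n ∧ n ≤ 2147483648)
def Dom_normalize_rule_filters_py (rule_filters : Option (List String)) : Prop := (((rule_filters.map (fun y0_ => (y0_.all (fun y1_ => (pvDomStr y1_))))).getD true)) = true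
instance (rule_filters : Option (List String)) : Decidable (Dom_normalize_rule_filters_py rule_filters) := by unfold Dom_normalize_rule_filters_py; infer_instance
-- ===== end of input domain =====

-- B replaces A's split/strip/filter pipeline by a single character-level state machine (different algorithm, same asymptotic cost); equivalence proved below.


-- ===== PORT A =====
-- literal transliteration: None/[] guard, then a nested loop appending each non-empty stripped comma-piece
def normalize_rule_filters_py (rule_filters : Option (List String)) : List String :=
  match rule_filters with
  | none => []
  | some rs =>
    if rs.isEmpty then []
    else
      rs.foldl (fun tokens raw =>
        (PySem.Chars.splitOn raw.toList [',']).foldl (fun tokens token =>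
          let stripped := PySem.Str.strip (String.ofList token)
          if stripped ≠ "" then tokens ++ [stripped] else tokens) tokens) []

-- ===== PORT B =====
-- literal transliteration of Source B: one char-level scan per string; `cur` holds the
-- current token (trailing whitespace withheld), `pend` the pending whitespace.
def pvFlushB (tokens : List String) (cur : List Char) : List String :=
  if cur ≠ [] then tokens ++ [String.ofList cur] else tokens

def pvStepB (st : List String × List Char × List Char) (ch : Char) :
    List String × List Char × List Char :=
  if ch = ',' then
    (pvFlushB st.1 st.2.1, [], [])
  else if PySem.Chars.isspace ch then
    (st.1, st.2.1, if st.2.1 ≠ [] then st.2.2 ++ [ch] else st.2.2)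
  else
    (st.1, st.2.1 ++ st.2.2 ++ [ch], [])

def normalize_rule_filters_py_alt (rule_filters : Option (List String)) : List String :=
  let rs := rule_filters.getD []          -- `rule_filters or []`
  rs.foldl (fun tokens raw =>
    let st := raw.toList.foldl pvStepB (tokens, ([] : List Char), ([] : List Char))
    pvFlushB st.1 st.2.1) []

-- ===== PRECONDITION & SPEC =====
def Spec_normalize_rule_filters_py (rule_filters : Option (List String)) (out : List String) : Prop := out = normalize_rule_filters_py_alt rule_filters
instance (rule_filters : Option (List String)) (out : List String) : Decidable (Spec_normalize_rule_filters_py rule_filters out) := by unfold Spec_normalize_rule_filters_py; infer_instance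

-- ===== CLAIM (what is proved, stated in full; the proofs are below) =====
def Claim_equal_normalize_rule_filters_py : Prop := ∀ (rule_filters : Option (List String)), Dom_normalize_rule_filters_py rule_filters → Spec_normalize_rule_filters_py rule_filters (normalize_rule_filters_py rule_filters)

-- ===== LEMMAS AND PROOFS =====

-- the per-string token list both programs produce (proof-side characterisation)
def pvAtok (l : List Char) : List String :=
  (((l.splitOnP (· == ',')).map PySem.Chars.strip).filter (· ≠ [])).map String.ofList

-- PySem's split on a one-character separator is Mathlib's List.splitOnP on that character.
theorem splitOn_go_single (c : Char) :
    ∀ (fuel : Nat) (l cur : List Char) (acc : List (List Char)), l.length < fuel →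
      PySem.Chars.splitOn.go [c] fuel l cur acc =
        acc.reverse ++ List.modifyHead (cur.reverse ++ ·) (List.splitOnP (· == c) l) := by
  intro fuel
  induction fuel with
  | zero => intro l cur acc h; omega
  | succ n ih =>
    intro l cur acc h
    cases l with
    | nil =>
      rw [PySem.Chars.splitOn.go.eq_def]
      simp [List.splitOnP_nil]
    | cons x rest =>
      rw [PySem.Chars.splitOn.go.eq_def]
      simp only []
      by_cases hx : x = c
      · subst hx
        have hpref : [x].isPrefixOf (x :: rest) = true := by simp [List.isPrefixOf]
        rw [if_pos hpref]
        rw [show List.drop [x].length (x :: rest) = rest from rfl]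
        rw [ih rest [] (cur.reverse :: acc) (by simpa using Nat.lt_of_succ_lt_succ h)]
        rcases hsp : List.splitOnP (· == x) rest with _ | ⟨hd, tl⟩
        · exact absurd hsp (List.splitOnP_ne_nil _ _)
        · simp [List.splitOnP_cons, hsp]
      · have hpref : [c].isPrefixOf (x :: rest) = false := by
          simp [List.isPrefixOf]
          exact fun hc => (hx hc.symm).elim
        rw [if_neg (by simp [hpref])]
        rw [ih rest (x :: cur) acc (by simpa using Nat.lt_of_succ_lt_succ h)]
        rcases hsp : List.splitOnP (· == c) rest with _ | ⟨hd, tl⟩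
        · exact absurd hsp (List.splitOnP_ne_nil _ _)
        · simp [List.splitOnP_cons, hsp, hx]

theorem splitOn_single (c : Char) (s : List Char) :
    PySem.Chars.splitOn s [c] = List.splitOnP (· == c) s := by
  have h := splitOn_go_single c (s.length + 1) s [] [] (by omega)
  rcases hsp : List.splitOnP (· == c) s with _ | ⟨hd, tl⟩
  · exact absurd hsp (List.splitOnP_ne_nil _ _)
  · simp [PySem.Chars.splitOn, hsp] at h ⊢; exact h

-- splitting distributes over a separator in the middle
theorem splitOnP_append_sep {α : Type} (p : α → Bool) (x : α) (hx : p x = true) :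
    ∀ (a b : List α), List.splitOnP p (a ++ x :: b) = List.splitOnP p a ++ List.splitOnP p b := by
  intro a
  induction a with
  | nil => intro b; simp [List.splitOnP_cons, hx, List.splitOnP_nil]
  | cons y a' ih =>
    intro b
    by_cases hy : p y = true
    · simp [List.splitOnP_cons, hy, ih]
    · rcases hsp : List.splitOnP p (a' ++ x :: b) with _ | ⟨hd, tl⟩
      · exact absurd hsp (List.splitOnP_ne_nil _ _)
      · rcases hsp' : List.splitOnP p a' with _ | ⟨hd', tl'⟩
        · exact absurd hsp' (List.splitOnP_ne_nil _ _)
        · have := ih b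
          rw [hsp, hsp'] at this
          cases this
          simp [List.splitOnP_cons, hy, hsp, hsp']

-- A's inner loop as map-filter
theorem inner_loop_eq (raw : List (List Char)) (acc : List String) :
    raw.foldl (fun tokens token =>
        let stripped := PySem.Str.strip (String.ofList token)
        if stripped ≠ "" then tokens ++ [stripped] else tokens) acc
      = acc ++ ((raw.map (fun t => PySem.Str.strip (String.ofList t))).filter (fun t => t ≠ "")) := by
  have hfun : (fun (tokens : List String) token =>
        let stripped := PySem.Str.strip (String.ofList token)
        if stripped ≠ "" then tokens ++ [stripped] else tokens)
      = (fun tokens token =>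
        if (!(PySem.Str.strip (String.ofList token) == "")) = true
        then tokens ++ [PySem.Str.strip (String.ofList token)] else tokens) := by
    funext tokens token
    simp
  rw [hfun, PySem.List.foldl_append_if]
  rw [List.filter_map]
  apply congrArg
  apply congrArg
  apply List.filter_congr
  intro token _
  rw [Bool.eq_iff_iff]
  simp

-- Str.strip through ofList
theorem strip_ofList (t : List Char) :
    PySem.Str.strip (String.ofList t) = String.ofList (PySem.Chars.strip t) := by
  rw [← String.toList_inj]
  simp [PySem.Str.toList_strip]

-- ofList is empty only on []
theorem ofList_eq_empty_iff (u : List Char) : String.ofList u = "" ↔ u = [] := by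
  constructor
  · intro h
    have := congrArg String.toList h
    simpa using this
  · intro h; subst h; rfl

-- A's per-string tokens are pvAtok
theorem a_tokens_eq (t : List Char) :
    ((t.splitOnP (· == ',')).map (fun u => PySem.Str.strip (String.ofList u))).filter (fun u => u ≠ "")
      = pvAtok t := by
  unfold pvAtok
  have hmap : ((t.splitOnP (· == ',')).map (fun u => PySem.Str.strip (String.ofList u)))
      = ((t.splitOnP (· == ',')).map PySem.Chars.strip).map String.ofList := by
    rw [List.map_map]
    apply List.map_congr_left
    intro u _
    simp [strip_ofList, Function.comp]
  rw [hmap, List.filter_map]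
  congr 1
  apply List.filter_congr
  intro u _
  rw [Bool.eq_iff_iff]
  simp only [Function.comp, ne_eq, decide_eq_true_eq]
  rw [ofList_eq_empty_iff]

-- strip of `cur ++ pend` under the machine invariant
theorem strip_cur_pend (cur pend : List Char)
    (h1 : cur.dropWhile PySem.Chars.isspace = cur)
    (h2 : cur.reverse.dropWhile PySem.Chars.isspace = cur.reverse)
    (hp : ∀ c ∈ pend, PySem.Chars.isspace c = true)
    (hlink : cur = [] → pend = []) :
    PySem.Chars.strip (cur ++ pend) = cur := by
  rcases eq_or_ne cur [] with hc | hc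
  · subst hc; rw [hlink rfl]; rfl
  · have hl : (cur ++ pend).dropWhile PySem.Chars.isspace = cur ++ pend := by
      rw [List.dropWhile_append, h1]
      simp [List.isEmpty_iff, hc]
    have hpr : pend.reverse.dropWhile PySem.Chars.isspace = [] := by
      rw [List.dropWhile_eq_nil_iff]
      intro x hx; exact hp x (by simpa using hx)
    show PySem.Chars.rstrip (PySem.Chars.lstrip (cur ++ pend)) = cur
    unfold PySem.Chars.lstrip PySem.Chars.rstrip
    rw [hl, List.reverse_append, List.dropWhile_append, hpr]
    simp [h2]

theorem comma_not_space : PySem.Chars.isspace ',' = false := by decide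

-- a leading whitespace char does not change pvAtok
theorem pvAtok_cons_ws (ch : Char) (l : List Char)
    (hc : ch ≠ ',') (hw : PySem.Chars.isspace ch = true) :
    pvAtok (ch :: l) = pvAtok l := by
  unfold pvAtok
  rcases hsp : l.splitOnP (· == ',') with _ | ⟨hd, tl⟩
  · exact absurd hsp (List.splitOnP_ne_nil _ _)
  · rw [List.splitOnP_cons, if_neg (by simp [hc]), hsp]
    simp only [List.modifyHead_cons, List.map_cons]
    have : PySem.Chars.strip (ch :: hd) = PySem.Chars.strip hd := by
      show PySem.Chars.rstrip (PySem.Chars.lstrip (ch :: hd)) = _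
      unfold PySem.Chars.lstrip
      rw [List.dropWhile_cons_of_pos hw]
      rfl
    rw [this]

-- the machine over one segment-plus-rest computes pvAtok of the reconstructed input
theorem goB : ∀ (l cur pend : List Char) (tokens : List String),
    cur.dropWhile PySem.Chars.isspace = cur →
    cur.reverse.dropWhile PySem.Chars.isspace = cur.reverse →
    (',' ∉ cur) →
    (∀ c ∈ pend, PySem.Chars.isspace c = true) →
    (cur = [] → pend = []) →
    pvFlushB (l.foldl pvStepB (tokens, cur, pend)).1 (l.foldl pvStepB (tokens, cur, pend)).2.1
      = tokens ++ pvAtok (cur ++ pend ++ l) := by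
  intro l
  induction l with
  | nil =>
    intro cur pend tokens h1 h2 hnc hp hlink
    have hnocomma : ∀ x ∈ cur ++ pend, ¬ ((x == ',') = true) := by
      intro x hx
      rcases List.mem_append.mp hx with h | h
      · simp only [beq_iff_eq]; intro he; exact hnc (he ▸ h)
      · simp only [beq_iff_eq]; intro he; subst he
        have := hp _ h; rw [comma_not_space] at this; exact absurd this (by simp)
    simp only [List.foldl_nil, List.append_nil]
    unfold pvAtok
    rw [List.splitOnP_eq_single _ _ hnocomma]
    simp only [List.map_cons, List.map_nil]
    rw [strip_cur_pend cur pend h1 h2 hp hlink]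
    unfold pvFlushB
    rcases eq_or_ne cur [] with hc | hc
    · simp [hc]
    · simp [hc]
  | cons ch l' ih =>
    intro cur pend tokens h1 h2 hnc hp hlink
    by_cases hcomma : ch = ','
    · subst hcomma
      have hnocomma : ∀ x ∈ cur ++ pend, ¬ ((x == ',') = true) := by
        intro x hx
        rcases List.mem_append.mp hx with h | h
        · simp only [beq_iff_eq]; intro he; exact hnc (he ▸ h)
        · simp only [beq_iff_eq]; intro he; subst he
          have := hp _ h; rw [comma_not_space] at this; exact absurd this (by simp)
      have hstep : pvStepB (tokens, cur, pend) ',' = (pvFlushB tokens cur, [], []) := by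
        simp [pvStepB]
      rw [List.foldl_cons, hstep,
          ih [] [] (pvFlushB tokens cur) (by simp) (by simp) (by simp) (by simp) (fun _ => rfl)]
      have hsplit : pvAtok (cur ++ pend ++ ',' :: l')
          = (if cur ≠ [] then [String.ofList cur] else []) ++ pvAtok l' := by
        unfold pvAtok
        rw [List.append_assoc] at *
        rw [show cur ++ (pend ++ ',' :: l') = (cur ++ pend) ++ ',' :: l' by simp,
            splitOnP_append_sep _ ',' (by simp) (cur ++ pend) l',
            List.splitOnP_eq_single _ _ hnocomma]
        simp only [List.map_append, List.filter_append, List.map_cons, List.map_nil]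
        rw [strip_cur_pend cur pend h1 h2 hp hlink]
        rcases eq_or_ne cur [] with hc | hc
        · simp [hc]
        · simp [hc]
      rw [hsplit]
      unfold pvFlushB
      rcases eq_or_ne cur [] with hc | hc
      · simp [hc]
      · simp [hc]
    · by_cases hws : PySem.Chars.isspace ch = true
      · rcases eq_or_ne cur [] with hc | hc
        · have hpe := hlink hc
          subst hc; subst hpe
          have hstep : pvStepB (tokens, [], []) ch = (tokens, [], []) := by
            simp [pvStepB, hcomma, hws]
          rw [List.foldl_cons, hstep,
              ih [] [] tokens (by simp) (by simp) (by simp) (by simp) (fun _ => rfl)]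
          simp only [List.nil_append]
          rw [pvAtok_cons_ws ch l' hcomma hws]
        · have hstep : pvStepB (tokens, cur, pend) ch = (tokens, cur, pend ++ [ch]) := by
            simp [pvStepB, hcomma, hws, hc]
          rw [List.foldl_cons, hstep,
              ih cur (pend ++ [ch]) tokens h1 h2 hnc
                (by intro c hcm; rcases List.mem_append.mp hcm with h | h
                    · exact hp c h
                    · simp at h; subst h; exact hws)
                (fun h => absurd h hc)]
          congr 2
          simp
      · -- ordinary character
        have hstep : pvStepB (tokens, cur, pend) ch = (tokens, cur ++ pend ++ [ch], []) := by
          simp [pvStepB, hcomma, hws]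
        have h1' : (cur ++ pend ++ [ch]).dropWhile PySem.Chars.isspace = cur ++ pend ++ [ch] := by
          rcases eq_or_ne cur [] with hc | hc
          · have hpe := hlink hc
            subst hc; subst hpe
            simp [hws]
          · rw [List.append_assoc, List.dropWhile_append, h1]
            simp [List.isEmpty_iff, hc]
        have h2' : (cur ++ pend ++ [ch]).reverse.dropWhile PySem.Chars.isspace
            = (cur ++ pend ++ [ch]).reverse := by
          simp only [List.reverse_append, List.reverse_cons, List.reverse_nil, List.nil_append,
            List.cons_append]
          rw [List.dropWhile_cons_of_neg (by simp [hws])]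
        have hnc' : ',' ∉ cur ++ pend ++ [ch] := by
          intro hm
          rcases List.mem_append.mp hm with h | h
          · rcases List.mem_append.mp h with h' | h'
            · exact hnc h'
            · have := hp _ h'; rw [comma_not_space] at this; exact absurd this (by simp)
          · simp at h; exact hcomma h.symm
        rw [List.foldl_cons, hstep,
            ih (cur ++ pend ++ [ch]) [] tokens h1' h2' hnc' (by simp) (by simp)]
        congr 2
        simp

-- B's per-string step produces pvAtok too
theorem b_step_eq (raw : String) (tokens : List String) :
    (let st := raw.toList.foldl pvStepB (tokens, ([] : List Char), ([] : List Char))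
     pvFlushB st.1 st.2.1) = tokens ++ pvAtok raw.toList := by
  have := goB raw.toList [] [] tokens (by simp) (by simp) (by simp) (by simp) (fun _ => rfl)
  simpa using this

-- A's per-string step produces pvAtok
theorem a_step_eq (raw : String) (tokens : List String) :
    (PySem.Chars.splitOn raw.toList [',']).foldl (fun tokens token =>
        let stripped := PySem.Str.strip (String.ofList token)
        if stripped ≠ "" then tokens ++ [stripped] else tokens) tokens
      = tokens ++ pvAtok raw.toList := by
  rw [inner_loop_eq, splitOn_single, a_tokens_eq]

-- ===== VERDICT (by name: the statement is the Claim_ definition above) =====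
theorem normalize_rule_filters_py_spec : Claim_equal_normalize_rule_filters_py := by
  intro rf _
  unfold Spec_normalize_rule_filters_py normalize_rule_filters_py normalize_rule_filters_py_alt
  cases rf with
  | none => rfl
  | some rs =>
    simp only [Option.getD_some]
    by_cases hrs : rs.isEmpty
    · rw [if_pos hrs]
      rw [List.isEmpty_iff] at hrs
      subst hrs; rfl
    · rw [if_neg hrs]
      have hfun : (fun (tokens : List String) (raw : String) =>
            (PySem.Chars.splitOn raw.toList [',']).foldl (fun tokens token =>
              let stripped := PySem.Str.strip (String.ofList token)
              if stripped ≠ "" then tokens ++ [stripped] else tokens) tokens)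
          = (fun (tokens : List String) (raw : String) =>
            let st := raw.toList.foldl pvStepB (tokens, ([] : List Char), ([] : List Char))
            pvFlushB st.1 st.2.1) := by
        funext tokens raw
        rw [a_step_eq, b_step_eq]
      rw [hfun]
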